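-- pv_equiv track=rewrite | github.com/DICKY1987/cli_multi_rapid_DEV | src/cli_multi_rapid/lib/optimizer.py | _get_default_tool_for_task
-- ===== SOURCE A (Python) =====
-- def _get_default_tool_for_task(task_description: str) -> str:
--     """Get default tool recommendation when no historical data exists."""
--     task_lower = task_description.lower()
--
--     # Simple heuristics for tool selection
--     if any(word in task_lower for word in ["python", "pip", "django", "flask"]):
--         return "python_tools"
--     elif any(word in task_lower for word in ["javascript", "node", "npm", "react"]):
--         return "javascript_tools"
--     elif any(word in task_lower for word in ["test", "unittest", "pytest"]):
--         return "testing_tools"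
--     elif any(word in task_lower for word in ["docs", "documentation", "readme"]):
--         return "documentation_tools"
--     elif any(word in task_lower for word in ["git", "commit", "branch"]):
--         return "git_ops"
--     else:
--         return "general_tools"
-- ===== SOURCE B (Python) =====
-- # B: single left-to-right scan over the text; at each position check every keyword
-- # for a match starting there, keeping the best (lowest-priority-index) category
-- # found anywhere; map the final index to a category name. Alternative algorithm:
-- # one position-scan computing a minimum instead of an ordered per-category cascade.
-- _KEYWORD_CAT = {
--     "python": 0, "pip": 0, "django": 0, "flask": 0,
--     "javascript": 1, "node": 1, "npm": 1, "react": 1,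
--     "test": 2, "unittest": 2, "pytest": 2,
--     "docs": 3, "documentation": 3, "readme": 3,
--     "git": 4, "commit": 4, "branch": 4,
-- }
-- _NAMES = ["python_tools", "javascript_tools", "testing_tools",
--           "documentation_tools", "git_ops", "general_tools"]
--
-- def _get_default_tool_for_task(task_description: str) -> str:
--     task_lower = task_description.lower()
--     best = 5
--     for i in range(len(task_lower)):
--         for word, cat in _KEYWORD_CAT.items():
--             if cat < best and task_lower.startswith(word, i):
--                 best = cat
--     return _NAMES[best]
-- ===== Notes on version B (the rewrite author's own statement) =====
-- stated objective: alternative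
-- what changed: Instead of testing the five categories in order with a substring search per keyword, B makes one left-to-right scan over the text positions, checks all 17 keywords for a match starting at each position, and keeps the minimum category index found, mapping it to a name at the end (first-match-by-category equals minimum matched category).
import Mathlib
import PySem

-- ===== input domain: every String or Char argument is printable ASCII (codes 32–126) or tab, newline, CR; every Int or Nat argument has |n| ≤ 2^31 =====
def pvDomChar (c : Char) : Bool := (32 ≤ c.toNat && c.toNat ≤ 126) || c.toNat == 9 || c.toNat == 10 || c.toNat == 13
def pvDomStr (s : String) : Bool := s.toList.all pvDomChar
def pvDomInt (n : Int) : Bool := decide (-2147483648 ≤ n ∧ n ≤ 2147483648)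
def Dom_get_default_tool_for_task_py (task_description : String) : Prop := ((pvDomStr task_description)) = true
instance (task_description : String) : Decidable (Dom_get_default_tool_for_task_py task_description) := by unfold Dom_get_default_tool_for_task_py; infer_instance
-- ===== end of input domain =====

-- B replaces A's ordered per-category substring cascade with one left-to-right scan over
-- the text positions that keeps the minimum matched category index (alternative algorithm).

-- ===== PORT A =====
def get_default_tool_for_task_py (task_description : String) : String :=
  let task_lower := PySem.Str.lower task_description
  if ["python", "pip", "django", "flask"].any (fun word => PySem.Str.isIn word task_lower) then
    "python_tools"
  else if ["javascript", "node", "npm", "react"].any (fun word => PySem.Str.isIn word task_lower) then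
    "javascript_tools"
  else if ["test", "unittest", "pytest"].any (fun word => PySem.Str.isIn word task_lower) then
    "testing_tools"
  else if ["docs", "documentation", "readme"].any (fun word => PySem.Str.isIn word task_lower) then
    "documentation_tools"
  else if ["git", "commit", "branch"].any (fun word => PySem.Str.isIn word task_lower) then
    "git_ops"
  else
    "general_tools"

-- ===== PORT B =====
-- the _KEYWORD_CAT dict of Source B, in insertion order (keys as char lists)
def pvKeywordCat : List (List Char × Nat) :=
  [ ("python".toList, 0), ("pip".toList, 0), ("django".toList, 0), ("flask".toList, 0),
    ("javascript".toList, 1), ("node".toList, 1), ("npm".toList, 1), ("react".toList, 1),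
    ("test".toList, 2), ("unittest".toList, 2), ("pytest".toList, 2),
    ("docs".toList, 3), ("documentation".toList, 3), ("readme".toList, 3),
    ("git".toList, 4), ("commit".toList, 4), ("branch".toList, 4) ]

-- the _NAMES list of Source B
def pvNames : List String :=
  ["python_tools", "javascript_tools", "testing_tools",
   "documentation_tools", "git_ops", "general_tools"]

-- inner for-loop body: task_lower.startswith(word, i) is exact as startswith on the drop-i suffix (0 ≤ i ≤ len)
def pvStep (tl : List Char) (i : Nat) (best : Nat) (wc : List Char × Nat) : Nat :=
  if wc.2 < best ∧ PySem.Chars.startswith (tl.drop i) wc.1 = true then wc.2 else best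

-- the nested for-loops of Source B: scan positions, at each check all keywords, keep the minimum
def pvBestFold (tl : List Char) : Nat :=
  (List.range tl.length).foldl (fun best i => pvKeywordCat.foldl (pvStep tl i) best) 5

def get_default_tool_for_task_py_alt (task_description : String) : String :=
  let task_lower := PySem.Str.lower task_description
  -- _NAMES[best]: the index is always within [0,5], so plain getD is exact here
  pvNames.getD (pvBestFold task_lower.toList) "general_tools"

-- ===== PRECONDITION & SPEC =====
def Spec_get_default_tool_for_task_py (task_description : String) (out : String) : Prop := out = get_default_tool_for_task_py_alt task_description
instance (task_description : String) (out : String) : Decidable (Spec_get_default_tool_for_task_py task_description out) := by unfold Spec_get_default_tool_for_task_py; infer_instance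

-- ===== CLAIM (what is proved, stated in full; the proofs are below) =====
def Claim_equal_get_default_tool_for_task_py : Prop := ∀ (task_description : String), Dom_get_default_tool_for_task_py task_description → Spec_get_default_tool_for_task_py task_description (get_default_tool_for_task_py task_description)

-- ===== LEMMAS AND PROOFS =====

-- the five any-conditions of A, indexed by category (proof-only helper)
def pvAnyCat (c : Nat) (s : String) : Bool :=
  match c with
  | 0 => ["python", "pip", "django", "flask"].any (fun word => PySem.Str.isIn word s)
  | 1 => ["javascript", "node", "npm", "react"].any (fun word => PySem.Str.isIn word s)
  | 2 => ["test", "unittest", "pytest"].any (fun word => PySem.Str.isIn word s)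
  | 3 => ["docs", "documentation", "readme"].any (fun word => PySem.Str.isIn word s)
  | 4 => ["git", "commit", "branch"].any (fun word => PySem.Str.isIn word s)
  | _ => false

-- inner fold never increases the accumulator
theorem pv_inner_le_init (tl : List Char) (i : Nat) :
    ∀ (L : List (List Char × Nat)) (b : Nat), L.foldl (pvStep tl i) b ≤ b := by
  intro L
  induction L with
  | nil => intro b; simp
  | cons wc rest ih =>
    intro b
    have h := ih (pvStep tl i b wc)
    have : pvStep tl i b wc ≤ b := by
      unfold pvStep; split_ifs with h1
      · exact Nat.le_of_lt h1.1
      · exact le_refl b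
    simpa using le_trans h this

-- a matched pair bounds the inner fold
theorem pv_inner_le_mem (tl : List Char) (i : Nat) :
    ∀ (L : List (List Char × Nat)) (b : Nat) (wc : List Char × Nat), wc ∈ L →
      PySem.Chars.startswith (tl.drop i) wc.1 = true →
      L.foldl (pvStep tl i) b ≤ wc.2 := by
  intro L
  induction L with
  | nil => intro b wc h; simp at h
  | cons hd rest ih =>
    intro b wc hmem hsw
    rcases List.mem_cons.mp hmem with heq | hrest
    · subst heq
      have h1 : pvStep tl i b wc ≤ wc.2 := by
        unfold pvStep; split_ifs with h2
        · exact le_refl _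
        · simp only [hsw, and_true, not_lt] at h2; exact h2
      simpa using le_trans (pv_inner_le_init tl i rest _) h1
    · simpa using ih (pvStep tl i b hd) wc hrest hsw

-- inner fold either returns its input or the category of some matched pair
theorem pv_inner_cases (tl : List Char) (i : Nat) :
    ∀ (L : List (List Char × Nat)) (b : Nat),
      L.foldl (pvStep tl i) b = b ∨
      ∃ wc ∈ L, PySem.Chars.startswith (tl.drop i) wc.1 = true ∧ L.foldl (pvStep tl i) b = wc.2 := by
  intro L
  induction L with
  | nil => intro b; left; simp
  | cons hd rest ih =>
    intro b
    rcases ih (pvStep tl i b hd) with h | ⟨wc, hm, hsw, hv⟩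
    · simp only [List.foldl_cons] at *
      rw [h]
      unfold pvStep
      split_ifs with h2
      · exact Or.inr ⟨hd, List.mem_cons_self, h2.2, rfl⟩
      · exact Or.inl rfl
    · exact Or.inr ⟨wc, List.mem_cons_of_mem _ hm, hsw, by simpa using hv⟩

-- outer fold never increases the accumulator
theorem pv_outer_le_init (tl : List Char) :
    ∀ (is : List Nat) (b : Nat), is.foldl (fun best i => pvKeywordCat.foldl (pvStep tl i) best) b ≤ b := by
  intro is
  induction is with
  | nil => intro b; simp
  | cons j rest ih =>
    intro b
    simpa using le_trans (ih _) (pv_inner_le_init tl j pvKeywordCat b)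

-- a match anywhere bounds the outer fold
theorem pv_outer_le_mem (tl : List Char) :
    ∀ (is : List Nat) (b : Nat) (i : Nat), i ∈ is →
      ∀ (wc : List Char × Nat), wc ∈ pvKeywordCat →
        PySem.Chars.startswith (tl.drop i) wc.1 = true →
        is.foldl (fun best i => pvKeywordCat.foldl (pvStep tl i) best) b ≤ wc.2 := by
  intro is
  induction is with
  | nil => intro b i h; simp at h
  | cons j rest ih =>
    intro b i hi wc hm hsw
    rcases List.mem_cons.mp hi with heq | hrest
    · subst heq
      simpa using le_trans (pv_outer_le_init tl rest _) (pv_inner_le_mem tl i pvKeywordCat b wc hm hsw)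
    · simpa using ih _ i hrest wc hm hsw

-- the outer fold either keeps its input or returns the category of some matched pair
theorem pv_outer_cases (tl : List Char) :
    ∀ (is : List Nat) (b : Nat),
      is.foldl (fun best i => pvKeywordCat.foldl (pvStep tl i) best) b = b ∨
      ∃ i ∈ is, ∃ wc ∈ pvKeywordCat, PySem.Chars.startswith (tl.drop i) wc.1 = true ∧
        is.foldl (fun best i => pvKeywordCat.foldl (pvStep tl i) best) b = wc.2 := by
  intro is
  induction is with
  | nil => intro b; left; simp
  | cons j rest ih =>
    intro b
    rcases ih (pvKeywordCat.foldl (pvStep tl j) b) with h | ⟨i, hi, wc, hm, hsw, hv⟩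
    · simp only [List.foldl_cons] at *
      rw [h]
      rcases pv_inner_cases tl j pvKeywordCat b with h2 | ⟨wc, hm, hsw, hv⟩
      · exact Or.inl h2
      · exact Or.inr ⟨j, List.mem_cons_self, wc, hm, hsw, hv⟩
    · exact Or.inr ⟨i, List.mem_cons_of_mem _ hi, wc, hm, hsw, by simpa using hv⟩

-- a nonempty prefix somewhere is a prefix starting at a position < length
theorem pv_exists_lt_prefix (w tl : List Char) (hw : w ≠ []) (j : Nat) (hp : w <+: tl.drop j) :
    ∃ i, i < tl.length ∧ w <+: tl.drop i := by
  by_cases hj : j < tl.length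
  · exact ⟨j, hj, hp⟩
  · exfalso
    have : tl.drop j = [] := List.drop_eq_nil_of_le (by omega)
    rw [this] at hp
    exact hw (List.eq_nil_of_prefix_nil hp)

-- any matched pair in the table makes the corresponding any-condition of A true
theorem pv_mem_to_any (s : String) (wc : List Char × Nat) (hm : wc ∈ pvKeywordCat) (i : Nat)
    (hsw : PySem.Chars.startswith ((s.toList).drop i) wc.1 = true) :
    pvAnyCat wc.2 s = true := by
  have hp : wc.1 <+: (s.toList).drop i := (PySem.Chars.startswith_iff _ _).mp hsw
  have hin : PySem.Chars.isIn wc.1 s.toList = true :=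
    (PySem.Chars.exists_prefix_drop_iff_isIn wc.1 s.toList).mp ⟨i, hp⟩
  fin_cases hm <;> simp_all [pvAnyCat, PySem.Str.isIn]

-- a true any-condition of A yields a matched pair at some position < length
theorem pv_any_to_mem (s : String) (c : Nat) (hc : c < 5) (h : pvAnyCat c s = true) :
    ∃ i, i < s.toList.length ∧ ∃ wc ∈ pvKeywordCat, wc.2 = c ∧
      PySem.Chars.startswith ((s.toList).drop i) wc.1 = true := by
  interval_cases c <;>
  · simp only [pvAnyCat, List.any_eq_true] at h
    obtain ⟨w, hw, hin⟩ := h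
    have h2 : PySem.Chars.isIn w.toList s.toList = true :=
      (PySem.Chars.isIn_iff_infix _ _).mpr ((PySem.Str.isIn_iff_infix _ _).mp hin)
    obtain ⟨j, hp⟩ := (PySem.Chars.exists_prefix_drop_iff_isIn _ _).mpr h2
    fin_cases hw <;>
    · obtain ⟨i, hi, hp'⟩ := pv_exists_lt_prefix _ _ (by decide) j hp
      refine ⟨i, hi, ⟨_, _⟩, ?_, rfl, (PySem.Chars.startswith_iff _ _).mpr hp'⟩
      decide

-- every table category index is < 5
theorem pv_cat_lt (wc : List Char × Nat) (hm : wc ∈ pvKeywordCat) : wc.2 < 5 := by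
  fin_cases hm <;> decide

-- a true any-condition bounds the scan result
theorem pv_hub (s : String) (c : Nat) (hc : c < 5) (h : pvAnyCat c s = true) :
    pvBestFold s.toList ≤ c := by
  obtain ⟨i, hi, wc, hm, hc2, hsw⟩ := pv_any_to_mem s c hc h
  have := pv_outer_le_mem s.toList (List.range s.toList.length) 5 i (List.mem_range.mpr hi) wc hm hsw
  unfold pvBestFold
  omega

-- the scan result is 5 or its any-condition holds
theorem pv_hcase (s : String) :
    pvBestFold s.toList = 5 ∨
      (pvBestFold s.toList < 5 ∧ pvAnyCat (pvBestFold s.toList) s = true) := by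
  rcases pv_outer_cases s.toList (List.range s.toList.length) 5 with h | ⟨i, _, wc, hm, hsw, hv⟩
  · exact Or.inl h
  · right
    have hv' : pvBestFold s.toList = wc.2 := hv
    rw [hv']
    exact ⟨pv_cat_lt wc hm, pv_mem_to_any s wc hm i hsw⟩

-- main characterization: the two programs agree for every lowered string s
theorem pv_main (s : String) :
    (if pvAnyCat 0 s = true then "python_tools"
     else if pvAnyCat 1 s = true then "javascript_tools"
     else if pvAnyCat 2 s = true then "testing_tools"
     else if pvAnyCat 3 s = true then "documentation_tools"
     else if pvAnyCat 4 s = true then "git_ops"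
     else "general_tools") = pvNames.getD (pvBestFold s.toList) "general_tools" := by
  have hcase := pv_hcase s
  split_ifs with h0 h1 h2 h3 h4
  · have hB : pvBestFold s.toList = 0 := Nat.le_zero.mp (pv_hub s 0 (by omega) h0)
    rw [hB]; rfl
  · have hle := pv_hub s 1 (by omega) h1
    have hB : pvBestFold s.toList = 1 := by
      rcases hcase with h | ⟨hlt, hany⟩
      · omega
      · interval_cases hv : (pvBestFold s.toList) <;> simp_all
    rw [hB]; rfl
  · have hle := pv_hub s 2 (by omega) h2
    have hB : pvBestFold s.toList = 2 := by
      rcases hcase with h | ⟨hlt, hany⟩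
      · omega
      · interval_cases hv : (pvBestFold s.toList) <;> simp_all
    rw [hB]; rfl
  · have hle := pv_hub s 3 (by omega) h3
    have hB : pvBestFold s.toList = 3 := by
      rcases hcase with h | ⟨hlt, hany⟩
      · omega
      · interval_cases hv : (pvBestFold s.toList) <;> simp_all
    rw [hB]; rfl
  · have hle := pv_hub s 4 (by omega) h4
    have hB : pvBestFold s.toList = 4 := by
      rcases hcase with h | ⟨hlt, hany⟩
      · omega
      · interval_cases hv : (pvBestFold s.toList) <;> simp_all
    rw [hB]; rfl
  · have hB : pvBestFold s.toList = 5 := by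
      rcases hcase with h | ⟨hlt, hany⟩
      · exact h
      · interval_cases hv : (pvBestFold s.toList) <;> simp_all
    rw [hB]; rfl

-- ===== VERDICT (by name: the statement is the Claim_ definition above) =====
theorem get_default_tool_for_task_py_spec : Claim_equal_get_default_tool_for_task_py := by
  intro td _
  unfold Spec_get_default_tool_for_task_py get_default_tool_for_task_py get_default_tool_for_task_py_alt
  exact pv_main (PySem.Str.lower td)
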